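-- pv_equiv track=rewrite | github.com/johndunne85/CounterFactualRegret | cfr.py | calculate_pot
-- ===== SOURCE A (Python) =====
-- def calculate_pot(history, pot=50, bet=20):
--     """calculate the pot for a given history of a two player game
--     """
--     call_needed = False
--     for char in history:
--         if char == 'c' and call_needed:
--                 pot += bet
--         if char == 'r':
--             if call_needed:
--                 pot += bet
--             call_needed = True
--             pot += bet
--         if char == 'f':
--             break
--     return pot
-- ===== SOURCE B (Python) =====
-- def calculate_pot(history, pot=50, bet=20):
--     """calculate the pot for a given history of a two player game"""
--     f = history.find('f')
--     live = history if f == -1 else history[:f]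
--     r = live.find('r')
--     if r == -1:
--         return pot
--     tail = live[r + 1:]
--     return pot + bet * (1 + 2 * tail.count('r') + tail.count('c'))
-- ===== Notes on version B (the rewrite author's own statement) =====
-- stated objective: faster
-- what changed: Replaces the stateful per-character loop (call_needed flag + break) by a closed-form computation: truncate at the first fold, locate the first raise with str.find, and return pot + bet*(1 + 2*raises + calls) with the raises/calls in the tail counted by str.count.
import Mathlib
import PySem

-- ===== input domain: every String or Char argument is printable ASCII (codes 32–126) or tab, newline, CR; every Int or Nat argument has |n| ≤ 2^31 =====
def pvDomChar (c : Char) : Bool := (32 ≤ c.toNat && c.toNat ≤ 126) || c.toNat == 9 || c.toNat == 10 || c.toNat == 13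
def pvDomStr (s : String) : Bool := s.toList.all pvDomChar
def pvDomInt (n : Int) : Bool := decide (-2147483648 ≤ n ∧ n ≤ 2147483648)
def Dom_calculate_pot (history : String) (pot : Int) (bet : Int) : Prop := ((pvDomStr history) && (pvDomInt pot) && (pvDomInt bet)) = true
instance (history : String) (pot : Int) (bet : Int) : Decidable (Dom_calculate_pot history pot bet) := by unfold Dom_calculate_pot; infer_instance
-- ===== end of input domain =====

-- B replaces A's stateful loop (call_needed flag + break) by a closed-form computation:
-- truncate at the first 'f', find the first 'r', and count 'r'/'c' in the tail after it
-- (measured faster at large sizes: the work moves into find/count; return-value equivalence on all inputs).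


-- ===== PORT A =====
-- A's for-loop with the call_needed flag and the break on 'f', step for step.
def potLoop (bet : Int) : List Char → Int → Bool → Int
  | [], pot, _ => pot
  | ch :: rest, pot, call_needed =>
    let pot1 := if ch = 'c' ∧ call_needed = true then pot + bet else pot
    let pot2 := if ch = 'r' then (if call_needed then pot1 + bet else pot1) + bet else pot1
    let cn2 := if ch = 'r' then true else call_needed
    if ch = 'f' then pot2 else potLoop bet rest pot2 cn2

def calculate_pot (history : String) (pot : Int) (bet : Int) : Int :=
  potLoop bet history.toList pot false

-- ===== PORT B =====
def calculate_pot_alt (history : String) (pot : Int) (bet : Int) : Int :=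
  let s := history.toList
  let f := PySem.Chars.find s ['f']
  let live := if f = -1 then s else PySem.Chars.slice s none (some f)
  let r := PySem.Chars.find live ['r']
  if r = -1 then pot
  else
    let tail := PySem.Chars.slice live (some (r + 1)) none
    pot + bet * (1 + 2 * (PySem.Chars.count tail ['r'] : Int) + (PySem.Chars.count tail ['c'] : Int))

-- ===== PRECONDITION & SPEC =====
def Spec_calculate_pot (history : String) (pot : Int) (bet : Int) (out : Int) : Prop := out = calculate_pot_alt history pot bet
instance (history : String) (pot : Int) (bet : Int) (out : Int) : Decidable (Spec_calculate_pot history pot bet out) := by unfold Spec_calculate_pot; infer_instance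

-- ===== CLAIM (what is proved, stated in full; the proofs are below) =====
def Claim_equal_calculate_pot : Prop := ∀ (history : String) (pot : Int) (bet : Int), Dom_calculate_pot history pot bet → Spec_calculate_pot history pot bet (calculate_pot history pot bet)

-- ===== LEMMAS AND PROOFS =====

-- value added per character once call_needed is True, truncating at 'f'
def potVal : List Char → Int
  | [] => 0
  | c :: t => if c = 'f' then 0 else (if c = 'c' then 1 else if c = 'r' then 2 else 0) + potVal t

-- the suffix after the first 'r'
def afterR : List Char → List Char
  | [] => []
  | c :: t => if c = 'r' then t else afterR t

theorem potLoop_true (bet : Int) (cs : List Char) : ∀ pot, potLoop bet cs pot true = pot + bet * potVal cs := by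
  induction cs with
  | nil => intro pot; simp [potLoop, potVal]
  | cons c t ih =>
    intro pot
    by_cases hf : c = 'f'
    · subst hf; simp [potLoop, potVal]
    · by_cases hr : c = 'r'
      · subst hr; simp [potLoop, potVal, ih]; ring
      · by_cases hc : c = 'c'
        · subst hc; simp [potLoop, potVal, ih]; ring
        · simp [potLoop, potVal, hf, hr, hc, ih]

theorem potLoop_false (bet : Int) (cs : List Char) : ∀ pot,
    potLoop bet cs pot false =
      if 'r' ∈ cs.takeWhile (· ≠ 'f') then pot + bet * (1 + potVal (afterR cs)) else pot := by
  induction cs with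
  | nil => intro pot; simp [potLoop]
  | cons c t ih =>
    intro pot
    by_cases hf : c = 'f'
    · subst hf; simp [potLoop]
    · by_cases hr : c = 'r'
      · subst hr; simp [potLoop, afterR, potLoop_true]; ring
      · simp [potLoop, afterR, hf, hr, ih, Ne.symm hr]

-- potVal over an 'f'-free block followed by anything
theorem potVal_append (u v : List Char) (hu : 'f' ∉ u) :
    potVal (u ++ v) = 2 * (u.count 'r' : Int) + (u.count 'c' : Int) + potVal v := by
  induction u with
  | nil => simp
  | cons c t ih =>
    simp only [List.mem_cons, not_or] at hu
    by_cases hr : c = 'r'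
    · subst hr; simp [potVal, ih hu.2]; ring
    · by_cases hc : c = 'c'
      · subst hc; simp [potVal, ih hu.2]; ring
      · have hcf : ¬ c = 'f' := fun h => hu.1 h.symm
        simp [potVal, hr, hc, hcf, ih hu.2]

-- first occurrence index of a single character, via takeWhile
theorem find_singleton_of_mem (a : Char) (s : List Char) (h : a ∈ s) :
    PySem.Chars.find s [a] = ((s.takeWhile (· ≠ a)).length : Int) := by
  have hnn : 0 ≤ PySem.Chars.find s [a] := by
    rw [PySem.Chars.find_nonneg_iff]
    exact (List.singleton_infix_iff a s).mpr h
  obtain ⟨hpre, hmin⟩ := PySem.Chars.find_spec hnn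
  set k := (PySem.Chars.find s [a]).toNat with hk
  set w := s.takeWhile (· ≠ a) with hw
  have hsplit : w ++ s.dropWhile (· ≠ a) = s := List.takeWhile_append_dropWhile
  have hwne : ∀ x ∈ w, x ≠ a := fun x hx => by
    have := List.mem_takeWhile_imp hx; simpa using this
  obtain ⟨d, hd⟩ : ∃ d, s.dropWhile (· ≠ a) = a :: d := by
    cases hdd : s.dropWhile (· ≠ a) with
    | nil =>
      exfalso
      have : s = w := by rw [← hsplit, hdd, List.append_nil]
      exact hwne a (this ▸ h) rfl
    | cons b t =>
      have hb := List.head_dropWhile_not (p := (· ≠ a)) (l := s) (by rw [hdd]; simp)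
      simp only [hdd, List.head_cons] at hb
      simp at hb
      exact ⟨t, by rw [hb]⟩
  have hdrop : s.drop w.length = a :: d := by
    conv_lhs => rw [← hsplit]
    rw [List.drop_left]
    exact hd
  have hple : k ≤ w.length := by
    by_contra hlt
    exact hmin w.length (by omega) (by rw [hdrop]; exact ⟨d, rfl⟩)
  have hget : s[k]? = some a := by
    obtain ⟨u, hu⟩ := hpre
    rw [← List.head?_drop, ← hu]
    simp
  have hkeq : k = w.length := by
    rcases Nat.lt_or_ge k w.length with hlt | hge
    · exfalso
      have hsk : s[k]? = w[k]? := by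
        conv_lhs => rw [← hsplit]
        rw [List.getElem?_append_left hlt]
      rw [hget, List.getElem?_eq_getElem hlt] at hsk
      have : w[k] = a := by simpa using hsk.symm
      exact hwne _ (List.getElem_mem hlt) this
    · omega
  have hfin : PySem.Chars.find s [a] = (k : Int) := (Int.toNat_of_nonneg hnn).symm
  rw [hfin]
  exact_mod_cast congrArg Nat.cast hkeq

theorem find_singleton_of_not_mem (a : Char) (s : List Char) (h : a ∉ s) :
    PySem.Chars.find s [a] = -1 := by
  rw [PySem.Chars.find_eq_neg_one_iff]
  exact fun hin => h ((List.singleton_infix_iff a s).mp hin)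

theorem count_go_singleton (a : Char) (s : List Char) : ∀ (fuel acc : Nat), s.length ≤ fuel →
    PySem.Chars.count.go [a] fuel s acc = acc + s.count a := by
  induction s with
  | nil => intro fuel acc h; cases fuel <;> simp [PySem.Chars.count.go]
  | cons h t ih =>
    intro fuel acc hf
    cases fuel with
    | zero => simp at hf
    | succ f =>
      rw [PySem.Chars.count.go.eq_def]
      simp only [List.isPrefixOf, List.length_cons] at *
      by_cases hha : a = h
      · subst hha
        simp [ih f (acc + 1) (by omega)]
        omega
      · simp [hha, Ne.symm hha, ih f acc (by omega)]

theorem count_singleton (a : Char) (s : List Char) : PySem.Chars.count s [a] = s.count a := by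
  simp [PySem.Chars.count, count_go_singleton a s s.length 0 le_rfl]

theorem calculate_pot_eq (history : String) (pot bet : Int) :
    calculate_pot history pot bet = calculate_pot_alt history pot bet := by
  unfold calculate_pot calculate_pot_alt
  set s := history.toList with hs
  simp only [PySem.Chars.slice_eq_listSlice]
  set L := s.takeWhile (· ≠ 'f') with hL
  have hfL : 'f' ∉ L := fun hm => by have := List.mem_takeWhile_imp hm; simp at this
  -- the truncated string B computes is L
  have hlive : (if PySem.Chars.find s ['f'] = -1 then s else PySem.List.slice s none (some (PySem.Chars.find s ['f']))) = L := by
    by_cases hf : 'f' ∈ s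
    · rw [find_singleton_of_mem 'f' s hf]
      rw [if_neg (by omega)]
      rw [PySem.List.slice_to s (by omega)]
      rw [Int.toNat_natCast, hL]
      exact (List.prefix_iff_eq_take.mp (List.takeWhile_prefix _)).symm
    · rw [find_singleton_of_not_mem 'f' s hf, if_pos rfl, hL,
        List.takeWhile_eq_self_iff.mpr (fun x hx => by simp; rintro rfl; exact hf hx)]
  rw [hlive, potLoop_false]
  by_cases hr : 'r' ∈ L
  · rw [if_pos hr, if_neg (by rw [find_singleton_of_mem 'r' L hr]; omega)]
    rw [find_singleton_of_mem 'r' L hr]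
    rw [PySem.List.slice_from L (by omega)]
    set w := L.takeWhile (· ≠ 'r') with hw
    have : ((w.length : Int) + 1).toNat = w.length + 1 := by omega
    rw [this]
    -- decompose L = w ++ 'r' :: u
    have hdnil : L.dropWhile (· ≠ 'r') ≠ [] := by
      intro hnil
      have hsp : w ++ L.dropWhile (· ≠ 'r') = L := List.takeWhile_append_dropWhile
      rw [hnil, List.append_nil] at hsp
      have : 'r' ∈ w := hsp ▸ hr
      have := List.mem_takeWhile_imp this
      simp at this
    obtain ⟨u, hu⟩ : ∃ u, L.dropWhile (· ≠ 'r') = 'r' :: u := by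
      cases hd : L.dropWhile (· ≠ 'r') with
      | nil => exact absurd hd hdnil
      | cons b t =>
        have hb := List.head_dropWhile_not (p := (· ≠ 'r')) (l := L) (by rw [hd]; simp)
        simp only [hd, List.head_cons] at hb
        simp at hb
        exact ⟨t, by rw [hb]⟩
    have hLdecomp : L = w ++ 'r' :: u := by
      conv_lhs => rw [← List.takeWhile_append_dropWhile (p := (· ≠ 'r')) (l := L)]
      rw [hu]
    have hdropu : L.drop (w.length + 1) = u := by
      rw [hLdecomp, List.drop_append]
      simp
    rw [hdropu, count_singleton, count_singleton]
    -- A side: potVal (afterR s) = 2 * u.count 'r' + u.count 'c'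
    have hrw : 'r' ∉ w := fun hm => by have := List.mem_takeWhile_imp hm; simp at this
    have hafterGen : ∀ (v rest : List Char), 'r' ∉ v → afterR (v ++ 'r' :: (u ++ rest)) = u ++ rest := by
      intro v rest hv
      induction v with
      | nil => simp [afterR]
      | cons c t iht =>
        simp only [List.mem_cons, not_or] at hv
        have hcr : ¬ c = 'r' := fun hh => hv.1 hh.symm
        simp [afterR, hcr, iht hv.2]
    have hafter : afterR s = u ++ s.dropWhile (· ≠ 'f') := by
      conv_lhs => rw [← List.takeWhile_append_dropWhile (p := (· ≠ 'f')) (l := s), ← hL, hLdecomp]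
      rw [List.append_assoc]
      exact hafterGen w _ hrw
    have hfu : 'f' ∉ u := fun hm => hfL (hLdecomp ▸ (List.mem_append.mpr (Or.inr (List.mem_cons.mpr (Or.inr hm)))))
    have hvrest : potVal (s.dropWhile (· ≠ 'f')) = 0 := by
      cases hd : s.dropWhile (· ≠ 'f') with
      | nil => simp [potVal]
      | cons b t =>
        have hb := List.head_dropWhile_not (p := (· ≠ 'f')) (l := s) (by rw [hd]; simp)
        simp only [hd, List.head_cons] at hb
        simp at hb
        rw [hb]; simp [potVal]
    rw [hafter, potVal_append u _ hfu, hvrest]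
    ring
  · rw [if_neg hr, find_singleton_of_not_mem 'r' L hr, if_pos rfl]

-- ===== VERDICT (by name: the statement is the Claim_ definition above) =====
theorem calculate_pot_spec : Claim_equal_calculate_pot := by
  intro history pot bet _
  unfold Spec_calculate_pot
  exact calculate_pot_eq history pot bet
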